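-- pv_equiv track=rewrite | github.com/jywang99/neetcode | medium/arraysAndHashing2.py | isRangeValid
-- ===== SOURCE A (Python) =====
-- from typing import List, Set
--
-- def isRangeValid(board: List[List[str]], yf: int, yt: int, xf: int, xt: int) -> bool:
--     ns: Set[str] = set()
--     for y in range(yf, yt):
--         for x in range(xf, xt):
--             n = board[y][x]
--             if n == ".": continue
--             if n in ns:
--                 return False
--             ns.add(n)
--     return True
-- ===== SOURCE B (Python) =====
-- def isRangeValid(board, yf, yt, xf, xt):
--     vals = sorted(board[y][x]
--                   for y in range(yf, yt)
--                   for x in range(xf, xt)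
--                   if board[y][x] != ".")
--     return all(a != b for a, b in zip(vals, vals[1:]))
-- ===== Notes on version B (the rewrite author's own statement) =====
-- stated objective: alternative
-- what changed: B collects all non-'.' cells of the rectangle, sorts them, and checks that no two adjacent sorted values are equal, replacing A's incremental seen-set loop with early return by a sort-based duplicate check.
-- outside the precondition, e.g. on isRangeValid([['1', 'b', '1', '2']], -1, 2, -1, 2): A returns False, B raises IndexError
import Mathlib
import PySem

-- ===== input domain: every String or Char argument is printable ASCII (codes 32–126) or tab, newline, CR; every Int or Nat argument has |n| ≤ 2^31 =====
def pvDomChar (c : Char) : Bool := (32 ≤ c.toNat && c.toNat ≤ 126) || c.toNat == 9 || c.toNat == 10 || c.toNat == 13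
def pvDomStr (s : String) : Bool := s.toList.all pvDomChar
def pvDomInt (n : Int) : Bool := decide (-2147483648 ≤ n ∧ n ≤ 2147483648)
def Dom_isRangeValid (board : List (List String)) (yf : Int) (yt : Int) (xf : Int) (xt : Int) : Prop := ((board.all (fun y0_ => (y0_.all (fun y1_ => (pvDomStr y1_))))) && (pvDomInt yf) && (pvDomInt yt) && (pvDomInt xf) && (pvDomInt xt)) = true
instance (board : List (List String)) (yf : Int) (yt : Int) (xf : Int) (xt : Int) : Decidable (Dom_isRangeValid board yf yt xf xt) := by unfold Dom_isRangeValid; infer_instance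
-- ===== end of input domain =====

-- B collects all non-'.' cells of the rectangle, sorts them, and checks that no two
-- adjacent sorted values are equal, instead of A's incremental seen-set loop with
-- early return (objective: alternative, sort-based duplicate check).

-- ===== PORT A =====
-- inner 'for x' loop: some ns' = fall through with updated seen-set; none = 'return False'
-- (or IndexError, which Pre_ excludes); board[y][x] is fetched per cell, as in the Python
def pvInnerA (board : List (List String)) (y : Int) : List Int → PySem.Set String → Option (PySem.Set String)
  | [], ns => some ns
  | x :: xs, ns =>
    match (PySem.List.pyGet? board y).bind (fun row => PySem.List.pyGet? row x) with
    | none => none          -- IndexError: excluded by Pre_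
    | some n =>
      if n == "." then pvInnerA board y xs ns
      else if PySem.Set.contains ns n then none
      else pvInnerA board y xs (PySem.Set.add ns n)

-- outer 'for y' loop
def pvOuterA (board : List (List String)) (xf xt : Int) : List Int → PySem.Set String → Bool
  | [], _ => true
  | y :: ys, ns =>
    match pvInnerA board y (PySem.List.pyRange xf xt 1) ns with
    | none => false
    | some ns' => pvOuterA board xf xt ys ns'

def isRangeValid (board : List (List String)) (yf : Int) (yt : Int) (xf : Int) (xt : Int) : Bool :=
  pvOuterA board xf xt (PySem.List.pyRange yf yt 1) PySem.Set.empty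

-- ===== PORT B =====
-- 'sorted(generator)' = PySem.List.sorted of the collected non-'.' cells;
-- 'zip(vals, vals[1:])' = vals.zip (vals.drop 1) (vals[1:] on a list is drop 1)
def isRangeValid_alt (board : List (List String)) (yf : Int) (yt : Int) (xf : Int) (xt : Int) : Bool :=
  let vals := PySem.List.sorted
    ((PySem.List.pyRange yf yt 1).flatMap (fun y =>
      ((PySem.List.pyRange xf xt 1).filterMap (fun x =>
        (PySem.List.pyGet? board y).bind (fun row => PySem.List.pyGet? row x))).filter
          (fun n => n != ".")))
    (fun v => v) false
  (vals.zip (vals.drop 1)).all (fun p => p.1 != p.2)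

-- ===== PRECONDITION & SPEC =====
-- Pre_ excludes rectangles containing an out-of-range cell index: there Python A raises
-- IndexError — or, when it meets a duplicate first, returns False early — while B, which
-- reads every cell before deciding, raises IndexError.
-- (closed form: either one of the two ranges is empty — then no cell is read — or every
-- y of range(yf,yt) is a valid index into board and, for every board row visited directly
-- or via negative-index wraparound, every x of range(xf,xt) is a valid index into it)
def Pre_isRangeValid (board : List (List String)) (yf : Int) (yt : Int) (xf : Int) (xt : Int) : Prop :=
  yt ≤ yf ∨ xt ≤ xf ∨ ((-(board.length : Int) ≤ yf ∧ yt ≤ (board.length : Int)) ∧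
    ∀ i < board.length, ((yf ≤ (i : Int) ∧ (i : Int) < yt) ∨
        (yf ≤ (i : Int) - board.length ∧ (i : Int) - board.length < yt)) →
      (-(((board.getD i []).length : Int)) ≤ xf ∧ xt ≤ (((board.getD i []).length : Int))))

instance (board : List (List String)) (yf : Int) (yt : Int) (xf : Int) (xt : Int) : Decidable (Pre_isRangeValid board yf yt xf xt) := by unfold Pre_isRangeValid; infer_instance

def pvWitness_isRangeValid : List (List String) × Int × Int × Int × Int :=
  ([["1", "2"], ["2", "."]], 0, 2, 0, 2)

def Spec_isRangeValid (board : List (List String)) (yf : Int) (yt : Int) (xf : Int) (xt : Int) (out : Bool) : Prop := out = isRangeValid_alt board yf yt xf xt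
instance (board : List (List String)) (yf : Int) (yt : Int) (xf : Int) (xt : Int) (out : Bool) : Decidable (Spec_isRangeValid board yf yt xf xt out) := by unfold Spec_isRangeValid; infer_instance

-- ===== CLAIM =====
def Claim_equal_isRangeValid : Prop := ∀ (board : List (List String)) (yf : Int) (yt : Int) (xf : Int) (xt : Int), Dom_isRangeValid board yf yt xf xt → Pre_isRangeValid board yf yt xf xt → Spec_isRangeValid board yf yt xf xt (isRangeValid board yf yt xf xt)

-- ===== LEMMAS AND PROOFS =====

-- abstract duplicate scan over the already-collected value list
def pvChk : List String → PySem.Set String → Option (PySem.Set String)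
  | [], ns => some ns
  | v :: vs, ns =>
    if PySem.Set.contains ns v then none else pvChk vs (PySem.Set.add ns v)

-- the non-'.' cell values of row y taken at the indices xs
def pvCellVals (board : List (List String)) (y : Int) (xs : List Int) : List String :=
  (xs.filterMap (fun x =>
    (PySem.List.pyGet? board y).bind (fun row => PySem.List.pyGet? row x))).filter
      (fun n => n != ".")

lemma pvInnerA_eq_chk (board : List (List String)) (y : Int) (xs : List Int)
    (ns : PySem.Set String)
    (h : ∀ x ∈ xs,
      ((PySem.List.pyGet? board y).bind (fun row => PySem.List.pyGet? row x)).isSome = true) :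
    pvInnerA board y xs ns = pvChk (pvCellVals board y xs) ns := by
  induction xs generalizing ns with
  | nil => rfl
  | cons x xs ih =>
    obtain ⟨n, hn⟩ := Option.isSome_iff_exists.mp (h x (by simp))
    have hrest : ∀ x' ∈ xs,
        ((PySem.List.pyGet? board y).bind (fun row => PySem.List.pyGet? row x')).isSome = true :=
      fun x' hx' => h x' (by simp [hx'])
    by_cases hdot : n = "."
    · simp [pvInnerA, pvCellVals, hn, hdot, ih _ hrest]
    · by_cases hc : n ∈ ns
      · simp [pvInnerA, pvChk, pvCellVals, hn, hdot, hc]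
      · simp [pvInnerA, pvChk, pvCellVals, hn, hdot, hc, ih _ hrest]

lemma pvChk_append (a b : List String) (ns : PySem.Set String) :
    pvChk (a ++ b) ns = (pvChk a ns).bind (fun ns' => pvChk b ns') := by
  induction a generalizing ns with
  | nil => rfl
  | cons v vs ih =>
    by_cases hc : v ∈ ns <;> simp [pvChk, hc, ih]

lemma pvOuterA_eq_chk (board : List (List String)) (xf xt : Int) (ys : List Int)
    (ns : PySem.Set String)
    (h : ∀ y ∈ ys, ∀ x ∈ PySem.List.pyRange xf xt 1,
      ((PySem.List.pyGet? board y).bind (fun row => PySem.List.pyGet? row x)).isSome = true) :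
    pvOuterA board xf xt ys ns =
      (pvChk (ys.flatMap (fun y =>
        pvCellVals board y (PySem.List.pyRange xf xt 1))) ns).isSome := by
  induction ys generalizing ns with
  | nil => rfl
  | cons y ys ih =>
    have hinner := pvInnerA_eq_chk board y (PySem.List.pyRange xf xt 1) ns (h y (by simp))
    have hrest : ∀ y' ∈ ys, ∀ x ∈ PySem.List.pyRange xf xt 1,
        ((PySem.List.pyGet? board y').bind (fun row => PySem.List.pyGet? row x)).isSome = true :=
      fun y' hy' => h y' (by simp [hy'])
    simp only [pvOuterA, hinner, List.flatMap_cons, pvChk_append]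
    cases hc : pvChk (pvCellVals board y (PySem.List.pyRange xf xt 1)) ns with
    | none => simp
    | some ns' => simp [ih _ hrest]

lemma pvChk_isSome_iff (vs : List String) (ns : PySem.Set String) :
    (pvChk vs ns).isSome = true ↔ vs.Nodup ∧ ∀ v ∈ vs, v ∉ ns := by
  induction vs generalizing ns with
  | nil => simp [pvChk]
  | cons v vs ih =>
    by_cases hv : v ∈ ns
    · have hn : pvChk (v :: vs) ns = none := by simp [pvChk, hv]
      rw [hn]
      simp only [Option.isSome_none, Bool.false_eq_true, false_iff]
      rintro ⟨-, h⟩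
      exact (h v (by simp)) hv
    · have hs : pvChk (v :: vs) ns = pvChk vs (PySem.Set.add ns v) := by simp [pvChk, hv]
      rw [hs, ih, List.nodup_cons]
      constructor
      · rintro ⟨hnd, hnin⟩
        have hvv : v ∉ vs := fun hmem => (hnin v hmem) (by simp [PySem.Set.mem_add])
        refine ⟨⟨hvv, hnd⟩, ?_⟩
        intro w hw
        rcases List.mem_cons.mp hw with rfl | hw'
        · exact hv
        · exact fun hwns => (hnin w hw') ((PySem.Set.mem_add ns v w).mpr (Or.inl hwns))
      · rintro ⟨⟨hvv, hnd⟩, hnin⟩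
        refine ⟨hnd, fun w hw hwadd => ?_⟩
        rcases (PySem.Set.mem_add ns v w).mp hwadd with hwns | rfl
        · exact (hnin w (List.mem_cons.mpr (Or.inr hw))) hwns
        · exact hvv hw

-- on a ≤-sorted list, 'no equal adjacent pair' is exactly Nodup
lemma pvAdjacent_iff_nodup (l : List String) (hs : l.Pairwise (· ≤ ·)) :
    ((l.zip (l.drop 1)).all (fun p => p.1 != p.2) = true) ↔ l.Nodup := by
  induction l with
  | nil => simp
  | cons a l ih =>
    cases l with
    | nil => simp
    | cons b t =>
      have hs' : (b :: t).Pairwise (· ≤ ·) := hs.tail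
      have hab : a ≤ b := (List.pairwise_cons.mp hs).1 b (by simp)
      have hble : ∀ x ∈ t, b ≤ x := (List.pairwise_cons.mp hs').1
      constructor
      · rintro hall
        simp only [List.drop_succ_cons, List.drop_zero, List.zip_cons_cons, List.all_cons,
          Bool.and_eq_true, bne_iff_ne, ne_eq] at hall
        obtain ⟨hne, hrest⟩ := hall
        have hnd' : (b :: t).Nodup := (ih hs').mp (by
          simpa [List.all_eq_true] using hrest)
        refine List.nodup_cons.mpr ⟨?_, hnd'⟩
        intro hmem
        rcases List.mem_cons.mp hmem with rfl | hmt
        · exact hne rfl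
        · have hlt : a < b := lt_of_le_of_ne hab hne
          exact absurd hlt (not_lt.mpr (hble a hmt))
      · intro hnd
        have hnd' := (List.nodup_cons.mp hnd).2
        have hne : a ≠ b := fun h => (List.nodup_cons.mp hnd).1 (h ▸ List.mem_cons_self ..)
        have hrest := (ih hs').mpr hnd'
        simpa [List.all_eq_true, hne] using
          And.intro hne (by simpa [List.all_eq_true] using hrest)

lemma pvPre_forall (board : List (List String)) (yf yt xf xt : Int)
    (h : Pre_isRangeValid board yf yt xf xt) :
    ∀ y ∈ PySem.List.pyRange yf yt 1, ∀ x ∈ PySem.List.pyRange xf xt 1,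
      ((PySem.List.pyGet? board y).bind (fun row => PySem.List.pyGet? row x)).isSome = true := by
  intro y hy x hx
  rw [PySem.List.mem_pyRange_one] at hy hx
  rcases h with hye | hxe | ⟨⟨h1, h2⟩, H⟩
  · exact absurd hy (by omega)
  · exact absurd hx (by omega)
  obtain ⟨i, hiL, hgy, hicond⟩ :
      ∃ i, i < board.length ∧ PySem.List.pyGet? board y = board[i]? ∧
        ((yf ≤ (i : Int) ∧ (i : Int) < yt) ∨
          (yf ≤ (i : Int) - board.length ∧ (i : Int) - board.length < yt)) := by
    by_cases hy0 : 0 ≤ y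
    · exact ⟨y.toNat, by omega, PySem.List.pyGet?_of_nonneg board hy0,
        Or.inl ⟨by omega, by omega⟩⟩
    · exact ⟨board.length - (-y).toNat, by omega,
        PySem.List.pyGet?_neg board (by omega) (by omega),
        Or.inr ⟨by omega, by omega⟩⟩
  have hgel : board[i]? = some (board.getD i []) := by
    simp [List.getD_eq_getElem?_getD, List.getElem?_eq_getElem hiL]
  have hrowbd := H i hiL hicond
  have hrx : PySem.List.pyGet? (board.getD i []) x ≠ none := by
    intro h0
    exact ((PySem.List.pyGet?_eq_none_iff (board.getD i []) x).mp h0) ⟨by omega, by omega⟩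
  rw [hgy, hgel]
  simpa [Option.isSome_iff_ne_none] using hrx

-- ===== VERDICT =====
theorem isRangeValid_spec : Claim_equal_isRangeValid := by
  intro board yf yt xf xt _ hpre0
  have hpre := pvPre_forall board yf yt xf xt hpre0
  unfold Spec_isRangeValid isRangeValid isRangeValid_alt
  rw [pvOuterA_eq_chk board xf xt (PySem.List.pyRange yf yt 1) PySem.Set.empty hpre]
  set V := (PySem.List.pyRange yf yt 1).flatMap (fun y =>
    ((PySem.List.pyRange xf xt 1).filterMap (fun x =>
      (PySem.List.pyGet? board y).bind (fun row => PySem.List.pyGet? row x))).filter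
        (fun n => n != ".")) with hVdef
  have hVc : (PySem.List.pyRange yf yt 1).flatMap (fun y =>
      pvCellVals board y (PySem.List.pyRange xf xt 1)) = V := rfl
  rw [hVc]
  have hsortnd : (PySem.List.sorted V (fun v => v) false).Nodup ↔ V.Nodup :=
    (PySem.List.sorted_perm V (fun v => v) false).nodup_iff
  have hadj := pvAdjacent_iff_nodup (PySem.List.sorted V (fun v => v) false)
    (PySem.List.sorted_pairwise V (fun v => v))
  by_cases hnd : V.Nodup
  · have h1 : (pvChk V PySem.Set.empty).isSome = true :=
      (pvChk_isSome_iff V PySem.Set.empty).mpr ⟨hnd, by intro v _ hv; simp [PySem.Set.empty] at hv⟩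
    rw [h1, eq_comm]
    exact hadj.mpr (hsortnd.mpr hnd)
  · have h1 : (pvChk V PySem.Set.empty).isSome = false := by
      rw [Bool.eq_false_iff]
      intro hs
      exact hnd ((pvChk_isSome_iff V PySem.Set.empty).mp hs).1
    rw [h1, eq_comm, Bool.eq_false_iff]
    intro hall
    exact hnd (hsortnd.mp (hadj.mp hall))
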